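-- pv_equiv track=rewrite | github.com/elie-atia/Interview-Questions | Algoritm Engineer/Mobileye/q7.py | find_all_path_to_end_points
-- ===== SOURCE A (Python) =====
-- def find_all_path_to_end_points(arr, path, end_points):
--     all_path = []
--
--     x, y = path[-1]
--
--     # Generate all possible next points
--     next_last_points = [        [x+i, y+j] for i in [-1, 0, 1] for j in [-1, 0, 1]
--         if (abs(j+i) == 1
--         and 0 <= x+i < len(arr)
--         and 0 <= y+j < len(arr[0])
--         and [x+i, y+j] not in path)
--     ]
--
--     # Generate all possible next paths
--     next_paths = [path + [next_point] for next_point in next_last_points]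
--
--     # Recursively find all paths to end points
--     for i in range(len(next_last_points)):
--         if next_paths[i][-1] in end_points:
--             all_path.append(next_paths[i])
--         all_path.extend(find_all_path_to_end_points(arr, next_paths[i], end_points))
--
--     return all_path
-- ===== SOURCE B (Python) =====
-- def find_all_path_to_end_points(arr, path, end_points):
--     rows = len(arr)
--     cols = len(arr[0]) if arr else 0
--
--     def extensions(p):
--         x, y = p[-1]
--         out = []
--         for dx, dy in ((-1, 0), (0, -1), (0, 1), (1, 0)):
--             nx, ny = x + dx, y + dy
--             if 0 <= nx < rows and 0 <= ny < cols and [nx, ny] not in p: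
--                 out.append(p + [[nx, ny]])
--         return out
--
--     result = []
--     # explicit DFS stack of partial paths; reversed pushes keep A's pre-order
--     stack = extensions(path)[::-1]
--     while stack:
--         p = stack.pop()
--         if p[-1] in end_points:
--             result.append(p)
--         stack.extend(extensions(p)[::-1])
--     return result
-- ===== Notes on version B (the rewrite author's own statement) =====
-- stated objective: alternative
-- what changed: Replaced A's recursive pre-order DFS with an iterative DFS on an explicit stack of partial paths (emit-on-pop, children pushed in reverse to preserve A's output order), with the neighbor generation done directly over the four unit directions instead of A's 3x3 comprehension filtered by |i+j|==1.
import Mathlib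
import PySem

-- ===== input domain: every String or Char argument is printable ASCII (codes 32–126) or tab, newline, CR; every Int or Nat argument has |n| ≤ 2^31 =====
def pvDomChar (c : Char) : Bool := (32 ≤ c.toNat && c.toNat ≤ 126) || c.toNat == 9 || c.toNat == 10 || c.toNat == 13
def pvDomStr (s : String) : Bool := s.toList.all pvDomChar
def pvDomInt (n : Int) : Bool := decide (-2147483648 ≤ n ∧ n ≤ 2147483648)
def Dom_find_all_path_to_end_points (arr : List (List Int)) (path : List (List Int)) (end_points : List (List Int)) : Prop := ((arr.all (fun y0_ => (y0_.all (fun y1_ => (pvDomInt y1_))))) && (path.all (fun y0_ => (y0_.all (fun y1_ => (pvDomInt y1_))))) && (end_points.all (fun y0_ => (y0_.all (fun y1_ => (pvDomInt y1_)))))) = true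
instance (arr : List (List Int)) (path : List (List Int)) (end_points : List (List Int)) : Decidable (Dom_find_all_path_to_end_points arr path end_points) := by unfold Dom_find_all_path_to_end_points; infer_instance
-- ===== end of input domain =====

-- B rewrites A's recursive pre-order DFS as an iterative DFS over an explicit stack of
-- partial paths (emit on pop; children pushed so that popping reproduces A's order);
-- objective: alternative (same asymptotic cost, no recursion).

-- ===== PORT A =====

-- A's `next_last_points` comprehension: i, j over [-1,0,1], filtered by |j+i|==1,
-- bounds, and non-membership in path (exact condition order preserved).
def pvNexts (arr : List (List Int)) (x y : Int) (path : List (List Int)) : List (List Int) :=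
  [-1, 0, 1].flatMap (fun i =>
    [-1, 0, 1].filterMap (fun j =>
      if (j + i).natAbs = 1 ∧ 0 ≤ x + i ∧ x + i < (arr.length : Int) ∧
         0 ≤ y + j ∧ y + j < ((arr.headD []).length : Int) ∧ [x + i, y + j] ∉ path
      then some [x + i, y + j] else none))

-- Python `x, y = p[-1]`: the last cell as a pair (none = IndexError/ValueError in Python)
def pvLast2 (p : List (List Int)) : Option (Int × Int) :=
  match PySem.List.pyGet? p (-1) with
  | some [x, y] => some (x, y)
  | _ => none

-- Python `p[-1] in end_points` (p is always nonempty where this is used)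
def pvLastIn (p : List (List Int)) (eps : List (List Int)) : Bool :=
  match PySem.List.pyGet? p (-1) with
  | some c => decide (c ∈ eps)
  | none => false

-- A's recursion, made total by a fuel counter only (each recursive call extends the
-- path with an in-bounds unvisited cell, so depth never exceeds rows*cols; the fuel
-- rows*cols+1 supplied below is proved sufficient — the 0 branch is never reached).
def pvFindFuel (fuel : Nat) (arr : List (List Int)) (path : List (List Int))
    (end_points : List (List Int)) : List (List (List Int)) :=
  match fuel with
  | 0 => []
  | fuel + 1 =>
    match pvLast2 path with
    | some (x, y) =>
      (pvNexts arr x y path).foldl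
        (fun all_path c =>
          (if pvLastIn (path ++ [c]) end_points then all_path ++ [path ++ [c]]
           else all_path)
          ++ pvFindFuel fuel arr (path ++ [c]) end_points) []
    | none => []  -- Python raises here (empty path / last cell not a pair); excluded by Pre_

def find_all_path_to_end_points (arr : List (List Int)) (path : List (List Int))
    (end_points : List (List Int)) : List (List (List Int)) :=
  pvFindFuel (arr.length * (arr.headD []).length + 1) arr path end_points

-- ===== PORT B =====

-- B's `extensions(p)`: the four unit directions in order, extended paths directly.
def pvExts (arr : List (List Int)) (p : List (List Int)) : List (List (List Int)) :=
  ((pvLast2 p).map (fun xy =>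
    [((-1 : Int), (0 : Int)), (0, -1), (0, 1), (1, 0)].foldl
      (fun out d =>
        if 0 ≤ xy.1 + d.1 ∧ xy.1 + d.1 < (arr.length : Int) ∧
           0 ≤ xy.2 + d.2 ∧ xy.2 + d.2 < ((arr.headD []).length : Int) ∧
           [xy.1 + d.1, xy.2 + d.2] ∉ p
        then out ++ [p ++ [[xy.1 + d.1, xy.2 + d.2]]] else out) [])).getD []
  -- a `none` last cell means Python already raised; the loop never pushes such a path

-- B's while loop over the explicit stack (kept top-at-head: Python's reversed-push +
-- pop-from-end equals push/pop at the head). Fuel only makes the loop total; the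
-- bound 10^(rows*cols+1) supplied below is proved to exceed the iteration count.
def pvLoopFuel (fuel : Nat) (arr : List (List Int)) (end_points : List (List Int))
    (stack : List (List (List Int))) (acc : List (List (List Int))) :
    List (List (List Int)) :=
  match fuel, stack with
  | 0, _ => acc  -- never reached: the supplied fuel exceeds the iteration count
  | _ + 1, [] => acc
  | fuel + 1, p :: rest =>
      pvLoopFuel fuel arr end_points (pvExts arr p ++ rest)
        (if pvLastIn p end_points then acc ++ [p] else acc)

def find_all_path_to_end_points_alt (arr : List (List Int)) (path : List (List Int))
    (end_points : List (List Int)) : List (List (List Int)) :=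
  pvLoopFuel (10 ^ (arr.length * (arr.headD []).length + 1)) arr end_points
    (pvExts arr path) []

-- ===== PRECONDITION & SPEC =====
-- Pre_ excludes exactly the inputs where Python A raises: an empty `path`
-- (IndexError on path[-1]) or a last cell that is not a pair (unpacking ValueError).
def Pre_find_all_path_to_end_points (arr : List (List Int)) (path : List (List Int)) (end_points : List (List Int)) : Prop :=
  (match path.getLast? with
   | some (_ :: _ :: rest) => rest.isEmpty
   | _ => false) = true

instance (arr : List (List Int)) (path : List (List Int)) (end_points : List (List Int)) : Decidable (Pre_find_all_path_to_end_points arr path end_points) := by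
  unfold Pre_find_all_path_to_end_points; infer_instance

def pvWitness_find_all_path_to_end_points : List (List Int) × List (List Int) × List (List Int) :=
  ([[0, 0], [0, 0]], [[0, 0]], [[0, 1]])

def Spec_find_all_path_to_end_points (arr : List (List Int)) (path : List (List Int)) (end_points : List (List Int)) (out : List (List (List Int))) : Prop := out = find_all_path_to_end_points_alt arr path end_points
instance (arr : List (List Int)) (path : List (List Int)) (end_points : List (List Int)) (out : List (List (List Int))) : Decidable (Spec_find_all_path_to_end_points arr path end_points out) := by unfold Spec_find_all_path_to_end_points; infer_instance

-- ===== CLAIM (what is proved, stated in full; the proofs are below) =====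
def Claim_equal_find_all_path_to_end_points : Prop := ∀ (arr : List (List Int)) (path : List (List Int)) (end_points : List (List Int)), Dom_find_all_path_to_end_points arr path end_points → Pre_find_all_path_to_end_points arr path end_points → Spec_find_all_path_to_end_points arr path end_points (find_all_path_to_end_points arr path end_points)

-- ===== LEMMAS AND PROOFS =====

-- cells of a path that lie on the grid, as a finite set of coordinates
def pvEnc (arr : List (List Int)) (c : List Int) : Option (ℕ × ℕ) :=
  match c with
  | [a, b] =>
      if 0 ≤ a ∧ a < (arr.length : Int) ∧ 0 ≤ b ∧ b < ((arr.headD []).length : Int)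
      then some (a.toNat, b.toNat) else none
  | _ => none

-- number of grid cells not yet on the path: bounds A's recursion depth
def pvFree (arr : List (List Int)) (p : List (List Int)) : ℕ :=
  ((Finset.range arr.length ×ˢ Finset.range (arr.headD []).length) \
    (p.filterMap (pvEnc arr)).toFinset).card

theorem pvFree_le (arr : List (List Int)) (p : List (List Int)) :
    pvFree arr p ≤ arr.length * (arr.headD []).length := by
  unfold pvFree
  calc _ ≤ (Finset.range arr.length ×ˢ Finset.range (arr.headD []).length).card :=
        Finset.card_le_card (Finset.sdiff_subset)
    _ = _ := by simp [Finset.card_product]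

theorem pvFree_append_lt (arr : List (List Int)) (p : List (List Int)) (a b : Int)
    (h1 : 0 ≤ a) (h2 : a < (arr.length : Int)) (h3 : 0 ≤ b)
    (h4 : b < ((arr.headD []).length : Int)) (h5 : [a, b] ∉ p) :
    pvFree arr (p ++ [[a, b]]) < pvFree arr p := by
  unfold pvFree
  have henc : pvEnc arr [a, b] = some (a.toNat, b.toNat) := by
    simp only [pvEnc]
    rw [if_pos ⟨h1, h2, h3, h4⟩]
  have hmem : (a.toNat, b.toNat) ∈
      (Finset.range arr.length ×ˢ Finset.range (arr.headD []).length) \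
        (p.filterMap (pvEnc arr)).toFinset := by
    simp only [Finset.mem_sdiff, Finset.mem_product, Finset.mem_range, List.mem_toFinset,
      List.mem_filterMap]
    refine ⟨⟨by omega, by omega⟩, ?_⟩
    rintro ⟨c, hc, hec⟩
    match c, hec with
    | [a', b'], hec =>
      simp only [pvEnc] at hec
      split at hec
      · rename_i hcond
        simp only [Option.some.injEq, Prod.mk.injEq] at hec
        have : a' = a := by omega
        have : b' = b := by omega
        subst_vars
        exact h5 hc
      · simp at hec
  apply Finset.card_lt_card
  constructor
  · intro z hz
    simp only [List.filterMap_append, List.filterMap_cons, List.filterMap_nil, henc,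
      Finset.mem_sdiff, List.mem_toFinset, List.mem_append] at hz ⊢
    exact ⟨hz.1, fun h => hz.2 (Or.inl h)⟩
  · intro hsub
    have := hsub hmem
    simp only [List.filterMap_append, List.filterMap_cons, List.filterMap_nil, henc,
      Finset.mem_sdiff, List.mem_toFinset, List.mem_append] at this
    exact this.2 (Or.inr (by simp))

theorem pvNexts_spec {arr : List (List Int)} {x y : Int} {path : List (List Int)}
    {c : List Int} (h : c ∈ pvNexts arr x y path) :
    ∃ a b, c = [a, b] ∧ 0 ≤ a ∧ a < (arr.length : Int) ∧ 0 ≤ b ∧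
      b < ((arr.headD []).length : Int) ∧ c ∉ path := by
  simp only [pvNexts, List.mem_flatMap, List.mem_filterMap] at h
  obtain ⟨i, _, j, _, hij⟩ := h
  split at hij
  · rename_i hcond
    obtain ⟨_, h1, h2, h3, h4, h5⟩ := hcond
    cases hij
    exact ⟨x + i, y + j, rfl, h1, h2, h3, h4, h5⟩
  · simp at hij

theorem pvNexts_free {arr : List (List Int)} {x y : Int} {path : List (List Int)}
    {c : List Int} (h : c ∈ pvNexts arr x y path) :
    pvFree arr (path ++ [c]) < pvFree arr path := by
  obtain ⟨a, b, rfl, h1, h2, h3, h4, h5⟩ := pvNexts_spec h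
  exact pvFree_append_lt arr path a b h1 h2 h3 h4 h5

-- B's extensions are exactly A's next points, each wrapped as an extended path
theorem pvExts_eq (arr : List (List Int)) (p : List (List Int)) {x y : Int}
    (h : pvLast2 p = some (x, y)) :
    pvExts arr p = (pvNexts arr x y p).map (fun c => p ++ [c]) := by
  simp only [pvExts, pvNexts, h, Option.map_some, Option.getD_some]
  norm_num [List.flatMap_cons, List.filterMap_cons, List.foldl_cons]
  split_ifs <;> simp_all

theorem pvExts_free {arr : List (List Int)} {p c : List (List Int)}
    (h : c ∈ pvExts arr p) : pvFree arr c < pvFree arr p := by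
  rcases hg : pvLast2 p with _ | ⟨x, y⟩
  · simp [pvExts, hg] at h
  · rw [pvExts_eq arr p hg] at h
    simp only [List.mem_map] at h
    obtain ⟨c, hc, rfl⟩ := h
    exact pvNexts_free hc

-- iteration bound for B's loop
def pvStackMeasure (arr : List (List Int)) (stack : List (List (List Int))) : ℕ :=
  (stack.map (fun p => 10 ^ pvFree arr p)).sum

theorem pvExts_sum_lt (arr : List (List Int)) (p : List (List Int)) :
    ((pvExts arr p).map (fun c => 10 ^ pvFree arr c)).sum < 10 ^ pvFree arr p := by
  rcases hne : pvExts arr p with _ | ⟨c0, cs⟩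
  · simpa using Nat.pos_pow_of_pos (pvFree arr p) (by omega)
  · rw [← hne]
    have hlen : (pvExts arr p).length ≤ 9 := by
      rcases hq : pvLast2 p with _ | ⟨x, y⟩
      · simp [pvExts, hq]
      · simp only [pvExts, hq, Option.map_some, Option.getD_some, List.foldl_cons,
          List.foldl_nil]
        split_ifs <;> simp
    have hfree : ∀ c ∈ pvExts arr p, pvFree arr c < pvFree arr p := fun c hc => pvExts_free hc
    have hm : 1 ≤ pvFree arr p := by
      have := hfree c0 (by rw [hne]; simp)
      omega
    have hub : ∀ v ∈ (pvExts arr p).map (fun c => 10 ^ pvFree arr c),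
        v ≤ 10 ^ (pvFree arr p - 1) := by
      intro v hv
      simp only [List.mem_map] at hv
      obtain ⟨c, hc, rfl⟩ := hv
      exact Nat.pow_le_pow_right (by norm_num) (by have := hfree c hc; omega)
    have hsum := List.sum_le_card_nsmul _ _ hub
    simp only [List.length_map, smul_eq_mul] at hsum
    have hpow : 10 ^ pvFree arr p = 10 * 10 ^ (pvFree arr p - 1) := by
      conv_lhs => rw [show pvFree arr p = (pvFree arr p - 1) + 1 from by omega]
      ring
    have hpos : 1 ≤ 10 ^ (pvFree arr p - 1) := Nat.one_le_pow _ _ (by norm_num)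
    nlinarith [hsum, Nat.mul_le_mul_right (10 ^ (pvFree arr p - 1)) hlen]

theorem pvStackMeasure_step (arr : List (List Int)) (p : List (List Int))
    (rest : List (List (List Int))) :
    pvStackMeasure arr (pvExts arr p ++ rest) < pvStackMeasure arr (p :: rest) := by
  simp only [pvStackMeasure, List.map_append, List.sum_append, List.map_cons, List.sum_cons]
  have := pvExts_sum_lt arr p
  omega

-- fuel irrelevance for A: any fuel strictly above the free-cell count gives the same value
theorem pvFindFuel_stable (f : Nat) : ∀ (g : Nat) (arr : List (List Int))
    (path : List (List Int)) (eps : List (List Int)),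
    pvFree arr path < f → pvFree arr path < g →
    pvFindFuel f arr path eps = pvFindFuel g arr path eps := by
  induction f with
  | zero => intro g arr path eps hf; omega
  | succ f ih =>
    intro g arr path eps hf hg
    cases g with
    | zero => omega
    | succ g =>
      rcases hl : pvLast2 path with _ | ⟨x, y⟩ <;>
        simp only [pvFindFuel, hl] <;> try rfl
      apply PySem.List.foldl_congr_mem
      intro acc c hc
      have hlt := pvNexts_free hc
      rw [ih g arr (path ++ [c]) eps (by omega) (by omega)]

theorem pv_foldl_emit {α β : Type} (l : List α) (q : α → Bool) (e : α → β)
    (f : α → List β) (acc : List β) :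
    l.foldl (fun acc x => (if q x then acc ++ [e x] else acc) ++ f x) acc
      = acc ++ l.flatMap (fun x => (if q x then [e x] else []) ++ f x) := by
  induction l generalizing acc with
  | nil => simp
  | cons x xs ih =>
    simp only [List.foldl_cons, List.flatMap_cons, ih]
    cases q x <;> simp

theorem pv_flatMap_congr {α β : Type} {l : List α} {f g : α → List β}
    (h : ∀ x ∈ l, f x = g x) : l.flatMap f = l.flatMap g := by
  induction l with
  | nil => rfl
  | cons x xs ih =>
    simp only [List.flatMap_cons, h x (by simp), ih (fun y hy => h y (by simp [hy]))]

-- one-step characterization of A as a flatMap over B's extensions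
theorem pv_findA_char (arr : List (List Int)) (path : List (List Int))
    (eps : List (List Int)) :
    find_all_path_to_end_points arr path eps
      = (pvExts arr path).flatMap (fun np =>
          (if pvLastIn np eps then [np] else [])
            ++ find_all_path_to_end_points arr np eps) := by
  unfold find_all_path_to_end_points
  conv_lhs => rw [pvFindFuel]
  rcases hg : pvLast2 path with _ | ⟨x, y⟩
  · simp [pvExts, hg]
  · dsimp only
    rw [pv_foldl_emit, pvExts_eq arr path hg, List.flatMap_map, List.nil_append]
    refine pv_flatMap_congr ?_
    intro c hc
    have hlt := pvNexts_free hc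
    have hle := pvFree_le arr path
    rw [pvFindFuel_stable (arr.length * (arr.headD []).length)
      (arr.length * (arr.headD []).length + 1) arr (path ++ [c]) eps (by omega) (by omega)]

-- B's loop flushes its whole stack as A's enumeration, given enough fuel
theorem pv_loop_char (f : Nat) : ∀ (arr : List (List Int)) (eps : List (List Int))
    (stack : List (List (List Int))) (acc : List (List (List Int))),
    pvStackMeasure arr stack < f →
    pvLoopFuel f arr eps stack acc
      = acc ++ stack.flatMap (fun p =>
          (if pvLastIn p eps then [p] else [])
            ++ find_all_path_to_end_points arr p eps) := by
  induction f with
  | zero => intro arr eps stack acc hf; omega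
  | succ f ih =>
    intro arr eps stack acc hf
    cases stack with
    | nil => simp [pvLoopFuel]
    | cons p rest =>
      have hstep := pvStackMeasure_step arr p rest
      rw [pvLoopFuel, ih arr eps _ _ (by omega), List.flatMap_append, List.flatMap_cons,
        ← pv_findA_char]
      cases pvLastIn p eps <;> simp

theorem pv_stack_bound (arr : List (List Int)) (path : List (List Int)) :
    pvStackMeasure arr (pvExts arr path)
      < 10 ^ (arr.length * (arr.headD []).length + 1) := by
  have h1 := pvExts_sum_lt arr path
  have h2 : (10 : ℕ) ^ pvFree arr path ≤ 10 ^ (arr.length * (arr.headD []).length) :=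
    Nat.pow_le_pow_right (by norm_num) (pvFree_le arr path)
  have h3 : (10 : ℕ) ^ (arr.length * (arr.headD []).length)
      < 10 ^ (arr.length * (arr.headD []).length + 1) :=
    Nat.pow_lt_pow_right (by norm_num) (by omega)
  calc pvStackMeasure arr (pvExts arr path) < 10 ^ pvFree arr path := h1
    _ ≤ 10 ^ (arr.length * (arr.headD []).length) := h2
    _ < _ := h3

theorem pv_main (arr : List (List Int)) (path : List (List Int))
    (eps : List (List Int)) :
    find_all_path_to_end_points arr path eps
      = find_all_path_to_end_points_alt arr path eps := by
  rw [pv_findA_char, find_all_path_to_end_points_alt,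
    pv_loop_char _ arr eps _ [] (pv_stack_bound arr path), List.nil_append]

-- ===== VERDICT (by name: the statement is the Claim_ definition above) =====
theorem find_all_path_to_end_points_spec : Claim_equal_find_all_path_to_end_points := by
  intro arr path eps _ _
  unfold Spec_find_all_path_to_end_points
  exact pv_main arr path eps
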